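-- pv_equiv track=rewrite | github.com/hathim-t-ai/BankStatementConverter | bankstatementconverter/advanced_converter.py | _is_synonym
-- ===== SOURCE A (Python) =====
-- def _is_synonym(header1: str, header2: str) -> bool:
--   """Check if two headers are synonyms."""
--   synonyms = {
--     'date': ['date', 'transaction date', 'trans date', 'dt'],
--     'description': ['description', 'desc', 'details', 'particulars', 'transaction', 'reference'],
--     'debit': ['debit', 'debit amount', 'withdrawal', 'withdrawals', 'out', 'dr'],
--     'credit': ['credit', 'credit amount', 'deposit', 'deposits', 'in', 'cr'],
--     'balance': ['balance', 'running balance', 'current balance', 'bal', 'amount'],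
--     'amount': ['amount', 'value', 'sum', 'total']
--   }
--
--   for key, synonym_list in synonyms.items():
--     if header1 in synonym_list and header2 in synonym_list:
--       return True
--
--   return False
-- ===== SOURCE B (Python) =====
-- _WORD_GROUP = [
--     ('date', 0), ('transaction date', 0), ('trans date', 0), ('dt', 0),
--     ('description', 1), ('desc', 1), ('details', 1), ('particulars', 1),
--     ('transaction', 1), ('reference', 1),
--     ('debit', 2), ('debit amount', 2), ('withdrawal', 2), ('withdrawals', 2),
--     ('out', 2), ('dr', 2),
--     ('credit', 3), ('credit amount', 3), ('deposit', 3), ('deposits', 3),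
--     ('in', 3), ('cr', 3),
--     ('balance', 4), ('running balance', 4), ('current balance', 4),
--     ('bal', 4), ('amount', 4),
--     ('amount', 5), ('value', 5), ('sum', 5), ('total', 5),
-- ]
--
--
-- def _group_ids(word):
--     """Ids of the synonym groups containing word, from the flat relation table."""
--     return {g for w, g in _WORD_GROUP if w == word}
--
--
-- def _is_synonym(header1: str, header2: str) -> bool:
--     """Check if two headers are synonyms: their group-id sets intersect."""
--     return not _group_ids(header1).isdisjoint(_group_ids(header2))
-- ===== Notes on version B (the rewrite author's own statement) =====
-- stated objective: alternative
-- what changed: B flattens the synonym dict into a word-to-group-id relation table, selects each header's set of group ids from it, and decides synonymy by a set-disjointness test, instead of A's early-return scan over the grouped lists with two membership tests per group.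
import Mathlib
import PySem

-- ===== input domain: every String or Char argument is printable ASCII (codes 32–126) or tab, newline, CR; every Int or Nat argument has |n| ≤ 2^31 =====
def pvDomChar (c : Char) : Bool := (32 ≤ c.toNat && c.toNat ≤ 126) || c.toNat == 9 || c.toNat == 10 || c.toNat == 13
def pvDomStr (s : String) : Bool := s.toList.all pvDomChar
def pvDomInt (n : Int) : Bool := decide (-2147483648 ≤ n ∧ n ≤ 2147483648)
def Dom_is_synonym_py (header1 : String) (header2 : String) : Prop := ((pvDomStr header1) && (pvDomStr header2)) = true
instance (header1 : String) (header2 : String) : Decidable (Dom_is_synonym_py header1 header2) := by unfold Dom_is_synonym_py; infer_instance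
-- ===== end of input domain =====

-- B replaces A's early-return scan over a dict of synonym-group lists by a flat
-- word-to-group-id relation table queried per header and a set-disjointness test
-- (alternative data representation and decomposition, same cost class).


-- ===== PORT A =====
-- A's literal dict of synonym groups, as an association list in insertion order.
def synonymsA : List (String × List String) :=
  [("date", ["date", "transaction date", "trans date", "dt"]),
   ("description", ["description", "desc", "details", "particulars", "transaction", "reference"]),
   ("debit", ["debit", "debit amount", "withdrawal", "withdrawals", "out", "dr"]),
   ("credit", ["credit", "credit amount", "deposit", "deposits", "in", "cr"]),
   ("balance", ["balance", "running balance", "current balance", "bal", "amount"]),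
   ("amount", ["amount", "value", "sum", "total"])]

-- A's 'for key, synonym_list in synonyms.items(): if … return True' loop (early return).
def aLoop (h1 h2 : String) : List (String × List String) → Bool
  | [] => false
  | (_, g) :: rest => if g.contains h1 && g.contains h2 then true else aLoop h1 h2 rest

def is_synonym_py (header1 : String) (header2 : String) : Bool :=
  aLoop header1 header2 synonymsA

-- ===== PORT B =====
-- B's flat word -> group-id relation table (module-level constant in Source B).
def wordGroupB : List (String × Int) :=
  [("date", 0), ("transaction date", 0), ("trans date", 0), ("dt", 0),
   ("description", 1), ("desc", 1), ("details", 1), ("particulars", 1),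
   ("transaction", 1), ("reference", 1),
   ("debit", 2), ("debit amount", 2), ("withdrawal", 2), ("withdrawals", 2),
   ("out", 2), ("dr", 2),
   ("credit", 3), ("credit amount", 3), ("deposit", 3), ("deposits", 3),
   ("in", 3), ("cr", 3),
   ("balance", 4), ("running balance", 4), ("current balance", 4),
   ("bal", 4), ("amount", 4),
   ("amount", 5), ("value", 5), ("sum", 5), ("total", 5)]

-- {g for w, g in _WORD_GROUP if w == word}
def groupIdsB (word : String) : PySem.Set Int :=
  PySem.Set.ofList ((wordGroupB.filter (fun p => p.1 == word)).map (fun p => p.2))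

-- not ids1.isdisjoint(ids2)
def is_synonym_py_alt (header1 : String) (header2 : String) : Bool :=
  !(PySem.Set.isdisjoint (groupIdsB header1) (groupIdsB header2))

-- ===== PRECONDITION & SPEC =====
def Spec_is_synonym_py (header1 : String) (header2 : String) (out : Bool) : Prop := out = is_synonym_py_alt header1 header2
instance (header1 : String) (header2 : String) (out : Bool) : Decidable (Spec_is_synonym_py header1 header2 out) := by unfold Spec_is_synonym_py; infer_instance

-- ===== CLAIM (what is proved, stated in full; the proofs are below) =====
def Claim_equal_is_synonym_py : Prop := ∀ (header1 : String) (header2 : String), Dom_is_synonym_py header1 header2 → Spec_is_synonym_py header1 header2 (is_synonym_py header1 header2)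

-- ===== LEMMAS AND PROOFS =====

-- B's flat table is exactly A's groups flattened with their positional index
-- (a closed computation over two small literals).
lemma wordGroupB_eq_flatten :
    wordGroupB =
      (PySem.List.enumerate (synonymsA.map Prod.snd)).flatMap
        (fun p => p.2.map (fun w => (w, p.1))) := by decide

-- A's loop returns true iff some group contains both headers.
lemma aLoop_iff (h1 h2 : String) (gs : List (String × List String)) :
    aLoop h1 h2 gs = true ↔ ∃ p ∈ gs, h1 ∈ p.2 ∧ h2 ∈ p.2 := by
  induction gs with
  | nil => simp [aLoop]
  | cons p gs ih =>
    obtain ⟨key, g⟩ := p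
    simp only [aLoop]
    by_cases hg : (g.contains h1 && g.contains h2) = true
    · rw [if_pos hg]
      simp only [Bool.and_eq_true, List.contains_iff_mem] at hg
      exact ⟨fun _ => ⟨(key, g), by simp, hg⟩, fun _ => rfl⟩
    · rw [if_neg hg, ih]
      simp only [Bool.and_eq_true, List.contains_iff_mem] at hg
      constructor
      · rintro ⟨q, hq, hm⟩
        exact ⟨q, List.mem_cons_of_mem _ hq, hm⟩
      · rintro ⟨q, hq, hm⟩
        rcases List.mem_cons.mp hq with rfl | hq'
        · exact absurd hm hg
        · exact ⟨q, hq', hm⟩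

-- Membership of a pair in B's flat table, through the flatten lemma.
lemma mem_wordGroupB (w : String) (g : Int) :
    (w, g) ∈ wordGroupB ↔
      ∃ (k : Nat) (h : k < synonymsA.length), g = (k : Int) ∧ w ∈ (synonymsA[k]'h).2 := by
  rw [wordGroupB_eq_flatten, List.mem_flatMap]
  constructor
  · rintro ⟨q, hq, hmem⟩
    rw [PySem.List.mem_enumerate_iff] at hq
    obtain ⟨k, hk, rfl⟩ := hq
    obtain ⟨u, hu, heq⟩ := List.mem_map.mp hmem
    cases heq
    rw [List.length_map] at hk
    refine ⟨k, hk, by push_cast; ring, ?_⟩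
    simpa using hu
  · rintro ⟨k, hk, rfl, hw⟩
    refine ⟨((0 : Int) + (k : Nat), (synonymsA.map Prod.snd)[k]'(by simpa using hk)), ?_, ?_⟩
    · rw [PySem.List.mem_enumerate_iff]
      exact ⟨k, by simpa using hk, rfl⟩
    · refine List.mem_map.mpr ⟨w, by simpa using hw, ?_⟩
      simp

-- B's per-word id set selects exactly the pairs of the table with that word.
lemma mem_groupIdsB (w : String) (g : Int) :
    g ∈ groupIdsB w ↔ (w, g) ∈ wordGroupB := by
  unfold groupIdsB
  rw [PySem.Set.mem_ofList]
  simp only [List.mem_map, List.mem_filter, beq_iff_eq]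
  constructor
  · rintro ⟨⟨w', g'⟩, ⟨hmem, rfl⟩, rfl⟩
    exact hmem
  · intro h
    exact ⟨(w, g), ⟨h, rfl⟩, rfl⟩

-- bool(not s.isdisjoint(t)) holds iff the two sets share an element.
lemma not_isdisjoint_iff (s t : PySem.Set Int) :
    (!(PySem.Set.isdisjoint s t)) = true ↔ ∃ g ∈ s, g ∈ t := by
  rw [Bool.not_eq_true', Bool.eq_false_iff, Ne, PySem.Set.isdisjoint_iff]
  push Not
  simp

-- ===== VERDICT (by name: the statement is the Claim_ definition above) =====
theorem is_synonym_py_spec : Claim_equal_is_synonym_py := by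
  intro h1 h2 _
  unfold Spec_is_synonym_py is_synonym_py is_synonym_py_alt
  rw [Bool.eq_iff_iff, aLoop_iff, not_isdisjoint_iff]
  constructor
  · rintro ⟨p, hp, hm1, hm2⟩
    obtain ⟨k, hk, rfl⟩ := List.mem_iff_getElem.mp hp
    exact ⟨(k : Int), (mem_groupIdsB h1 _).mpr ((mem_wordGroupB h1 _).mpr ⟨k, hk, rfl, hm1⟩),
      (mem_groupIdsB h2 _).mpr ((mem_wordGroupB h2 _).mpr ⟨k, hk, rfl, hm2⟩)⟩
  · rintro ⟨g, hg1, hg2⟩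
    obtain ⟨k, hk, hg, hw1⟩ := (mem_wordGroupB h1 g).mp ((mem_groupIdsB h1 g).mp hg1)
    obtain ⟨k', hk', hg', hw2⟩ := (mem_wordGroupB h2 g).mp ((mem_groupIdsB h2 g).mp hg2)
    have hkk : k' = k := by
      have hik : (k : Int) = (k' : Int) := by rw [← hg, hg']
      exact_mod_cast hik.symm
    simp only [hkk] at hw2
    exact ⟨synonymsA[k]'hk, List.getElem_mem _, hw1, hw2⟩
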